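-- pv_equiv track=rewrite | github.com/dengguojie/vue-element-admin | auto_schedule/python/tbe/dsl/unify_schedule/reduce_tilingcase.py | _reorder_reduce_last_shape
-- ===== SOURCE A (Python) =====
-- from typing import List
--
-- def _reorder_reduce_last_shape(shape_before_reduce: list,
--                                reduce_axis_index: List[int]):
--     """
--     reorder shape (a4,r4,a3,r3,a2,r2,a1,r1) to (a4,a3,a2,a1,r4,r3,r2,r1)
--     :param shape_before_reduce: like(a4,r4,a3,r3,a2,r2,a1,r1)
--     :param reduce_axis_index
--     :return:
--     """
--     # shape_before_reduce: (a4,r4,a3,r3,a2,r2,a1,r1)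
--
--     orignal_to_reorder_axis_map = {}
--     reorder_to_orignal_axis_map = {}
--
--     reordered_shape = []
--     temp_axis = 0
--     for i, ele in enumerate(shape_before_reduce):
--         if i not in reduce_axis_index:
--             reordered_shape.append(ele)
--             reorder_to_orignal_axis_map[temp_axis] = i
--             orignal_to_reorder_axis_map[i] = temp_axis
--             temp_axis = temp_axis + 1
--
--     for i, ele in enumerate(shape_before_reduce):
--         if i in reduce_axis_index:
--             reordered_shape.append(ele)
--             reorder_to_orignal_axis_map[temp_axis] = i
--             orignal_to_reorder_axis_map[i] = temp_axis
--             temp_axis = temp_axis + 1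
--
--     return reordered_shape, reorder_to_orignal_axis_map, orignal_to_reorder_axis_map
-- ===== SOURCE B (Python) =====
-- from typing import List
--
--
-- def _reorder_reduce_last_shape(shape_before_reduce: list,
--                                reduce_axis_index: List[int]):
--     """Rank-arithmetic version: one pass computes each axis's destination
--     position directly (non-reduce axes get ranks 0..k-1, reduce axes get
--     k, k+1, ... via two counters), then a single sort by destination lays
--     out the shape and both axis maps."""
--     n = len(shape_before_reduce)
--     is_reduce = [i in reduce_axis_index for i in range(n)]
--     k = is_reduce.count(False)
--
--     pairs = []  # (destination position, original axis)
--     a = r = 0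
--     for i, red in enumerate(is_reduce):
--         if red:
--             pairs.append((k + r, i))
--             r += 1
--         else:
--             pairs.append((a, i))
--             a += 1
--     pairs.sort()
--
--     reordered_shape = [shape_before_reduce[i] for _, i in pairs]
--     reorder_to_orignal_axis_map = {t: i for t, i in pairs}
--     orignal_to_reorder_axis_map = {i: t for t, i in pairs}
--     return reordered_shape, reorder_to_orignal_axis_map, orignal_to_reorder_axis_map
-- ===== Notes on version B (the rewrite author's own statement) =====
-- stated objective: alternative
-- what changed: Instead of A's two filtered emission scans (each re-testing membership per axis), B computes each axis's destination position arithmetically in one pass (two rank counters: non-reduce axes get 0..k-1, reduce axes k..n-1) over a membership table built once, then sorts the (destination, axis) pairs by destination and reads the shape and both axis maps off the sorted table.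
import Mathlib
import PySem

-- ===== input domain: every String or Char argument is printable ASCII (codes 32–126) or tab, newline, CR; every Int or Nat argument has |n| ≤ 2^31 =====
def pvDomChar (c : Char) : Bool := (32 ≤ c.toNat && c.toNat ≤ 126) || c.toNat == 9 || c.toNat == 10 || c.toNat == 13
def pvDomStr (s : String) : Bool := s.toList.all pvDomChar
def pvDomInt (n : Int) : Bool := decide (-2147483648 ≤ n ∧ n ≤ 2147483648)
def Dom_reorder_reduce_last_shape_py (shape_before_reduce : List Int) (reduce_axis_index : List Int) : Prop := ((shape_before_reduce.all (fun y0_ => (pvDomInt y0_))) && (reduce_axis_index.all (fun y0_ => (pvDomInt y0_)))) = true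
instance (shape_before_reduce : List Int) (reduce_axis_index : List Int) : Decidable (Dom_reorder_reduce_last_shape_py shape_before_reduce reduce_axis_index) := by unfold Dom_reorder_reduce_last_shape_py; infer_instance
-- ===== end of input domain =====

-- B replaces A's two filtered emission scans by rank arithmetic: one pass computes each
-- axis's destination position with two counters, then a single sort by destination lays
-- out the shape and both axis maps (objective: alternative algorithm, same overall cost).

-- ===== PORT A =====
-- state = (reordered_shape, reorder_to_orignal_axis_map, orignal_to_reorder_axis_map, temp_axis)
def reorder_reduce_last_shape_py (shape_before_reduce : List Int) (reduce_axis_index : List Int) : List Int × (List (Int × Int)) × (List (Int × Int)) :=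
  let s1 := (PySem.List.enumerate shape_before_reduce).foldl
      (fun st p =>
        if p.1 ∉ reduce_axis_index then
          (st.1 ++ [p.2], st.2.1.insert st.2.2.2 p.1, st.2.2.1.insert p.1 st.2.2.2, st.2.2.2 + 1)
        else st)
      (([] : List Int), (PySem.Dict.empty : PySem.Dict Int Int), (PySem.Dict.empty : PySem.Dict Int Int), (0 : Int))
  let s2 := (PySem.List.enumerate shape_before_reduce).foldl
      (fun st p =>
        if p.1 ∈ reduce_axis_index then
          (st.1 ++ [p.2], st.2.1.insert st.2.2.2 p.1, st.2.2.1.insert p.1 st.2.2.2, st.2.2.2 + 1)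
        else st)
      s1
  (s2.1, s2.2.1.items, s2.2.2.1.items)

-- ===== PORT B =====
-- is_reduce = [i in reduce_axis_index for i in range(n)]
def pvIsReduce (shape_before_reduce : List Int) (reduce_axis_index : List Int) : List Bool :=
  (PySem.List.pyRange 0 (shape_before_reduce.length : Int) 1).map (fun i => decide (i ∈ reduce_axis_index))

-- k = is_reduce.count(False)
def pvK (shape_before_reduce : List Int) (reduce_axis_index : List Int) : Int :=
  (PySem.List.count (pvIsReduce shape_before_reduce reduce_axis_index) false : Int)

-- the rank pass (state = (pairs, a, r)) followed by pairs.sort() (lexicographic on the 2-tuples)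
def pvPairs (shape_before_reduce : List Int) (reduce_axis_index : List Int) : List (Int × Int) :=
  PySem.List.sorted2
    (((PySem.List.enumerate (pvIsReduce shape_before_reduce reduce_axis_index)).foldl
        (fun st p =>
          if p.2 then (st.1 ++ [(pvK shape_before_reduce reduce_axis_index + st.2.2, p.1)], st.2.1, st.2.2 + 1)
          else (st.1 ++ [(st.2.1, p.1)], st.2.1 + 1, st.2.2))
        (([] : List (Int × Int)), (0 : Int), (0 : Int))).1)
    (fun p => p.1) (fun p => p.2)

-- every original axis i in pairs lies in range(n), so pyGetD is exact for shape_before_reduce[i]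
def reorder_reduce_last_shape_py_alt (shape_before_reduce : List Int) (reduce_axis_index : List Int) : List Int × (List (Int × Int)) × (List (Int × Int)) :=
  ((pvPairs shape_before_reduce reduce_axis_index).map (fun p => PySem.List.pyGetD shape_before_reduce p.2 0),
   ((pvPairs shape_before_reduce reduce_axis_index).foldl (fun (d : PySem.Dict Int Int) p => d.insert p.1 p.2) PySem.Dict.empty).items,
   ((pvPairs shape_before_reduce reduce_axis_index).foldl (fun (d : PySem.Dict Int Int) p => d.insert p.2 p.1) PySem.Dict.empty).items)

-- ===== PRECONDITION & SPEC =====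
def Spec_reorder_reduce_last_shape_py (shape_before_reduce : List Int) (reduce_axis_index : List Int) (out : List Int × (List (Int × Int)) × (List (Int × Int))) : Prop := out = reorder_reduce_last_shape_py_alt shape_before_reduce reduce_axis_index
instance (shape_before_reduce : List Int) (reduce_axis_index : List Int) (out : List Int × (List (Int × Int)) × (List (Int × Int))) : Decidable (Spec_reorder_reduce_last_shape_py shape_before_reduce reduce_axis_index out) := by unfold Spec_reorder_reduce_last_shape_py; infer_instance

-- ===== CLAIM (what is proved, stated in full; the proofs are below) =====
def Claim_equal_reorder_reduce_last_shape_py : Prop := ∀ (shape_before_reduce : List Int) (reduce_axis_index : List Int), Dom_reorder_reduce_last_shape_py shape_before_reduce reduce_axis_index → Spec_reorder_reduce_last_shape_py shape_before_reduce reduce_axis_index (reorder_reduce_last_shape_py shape_before_reduce reduce_axis_index)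

-- ===== LEMMAS AND PROOFS =====

-- proof-only helpers: the two halves of the permutation and their enumeration
def pvNonRed (shape_before_reduce : List Int) (reduce_axis_index : List Int) : List Int :=
  (PySem.List.pyRange 0 (shape_before_reduce.length : Int) 1).filter (fun i => !decide (i ∈ reduce_axis_index))
def pvRed (shape_before_reduce : List Int) (reduce_axis_index : List Int) : List Int :=
  (PySem.List.pyRange 0 (shape_before_reduce.length : Int) 1).filter (fun i => decide (i ∈ reduce_axis_index))

-- the unsorted rank pairs, read off recursively
def pvG (k : Int) : List (Int × Bool) → Int → Int → List (Int × Int)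
  | [], _, _ => []
  | p :: rest, a, r =>
      if p.2 then (k + r, p.1) :: pvG k rest a (r + 1) else (a, p.1) :: pvG k rest (a + 1) r

-- Folding A's (unguarded) step over index/value pairs (j, shape[j]) equals folding the
-- combined step over the enumerated index list, with temp_axis tracked as t + length.
lemma pv_bridge (shape : List Int) :
    ∀ (idxs : List Int) (t : Int) (rs : List Int) (d1 d2 : PySem.Dict Int Int),
      (idxs.map (fun j => (j, PySem.List.pyGetD shape j 0))).foldl
        (fun st (p : Int × Int) =>
          (st.1 ++ [p.2], st.2.1.insert st.2.2.2 p.1, st.2.2.1.insert p.1 st.2.2.2, st.2.2.2 + 1))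
        (rs, d1, d2, t)
      = (((PySem.List.enumerate idxs t).foldl
            (fun st (p : Int × Int) =>
              (st.1 ++ [PySem.List.pyGetD shape p.2 0], st.2.1.insert p.1 p.2, st.2.2.insert p.2 p.1))
            (rs, d1, d2)).1,
         ((PySem.List.enumerate idxs t).foldl
            (fun st (p : Int × Int) =>
              (st.1 ++ [PySem.List.pyGetD shape p.2 0], st.2.1.insert p.1 p.2, st.2.2.insert p.2 p.1))
            (rs, d1, d2)).2.1,
         ((PySem.List.enumerate idxs t).foldl
            (fun st (p : Int × Int) =>
              (st.1 ++ [PySem.List.pyGetD shape p.2 0], st.2.1.insert p.1 p.2, st.2.2.insert p.2 p.1))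
            (rs, d1, d2)).2.2,
         t + (idxs.length : Int)) := by
  intro idxs
  induction idxs with
  | nil => intro t rs d1 d2; simp [PySem.List.enumerate_nil]
  | cons j rest ih =>
      intro t rs d1 d2
      simp only [List.map_cons, List.foldl_cons, PySem.List.enumerate_cons]
      rw [ih]
      simp only [List.length_cons]
      refine Prod.ext rfl (Prod.ext rfl (Prod.ext rfl ?_))
      push_cast
      ring

-- the combined fold splits into its three independent components
lemma pv_split (shape : List Int) :
    ∀ (l : List (Int × Int)) (rs : List Int) (d1 d2 : PySem.Dict Int Int),
      l.foldl
        (fun st (p : Int × Int) =>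
          (st.1 ++ [PySem.List.pyGetD shape p.2 0], st.2.1.insert p.1 p.2, st.2.2.insert p.2 p.1))
        (rs, d1, d2)
      = (rs ++ l.map (fun p => PySem.List.pyGetD shape p.2 0),
         l.foldl (fun (d : PySem.Dict Int Int) p => d.insert p.1 p.2) d1,
         l.foldl (fun (d : PySem.Dict Int Int) p => d.insert p.2 p.1) d2) := by
  intro l
  induction l with
  | nil => intro rs d1 d2; simp
  | cons p rest ih => intro rs d1 d2; simp [ih]

-- the first component of B's rank pass is pvG
lemma pv_fold_fst (k : Int) :
    ∀ (q : List (Int × Bool)) (a r : Int) (P : List (Int × Int)),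
      ((q.foldl
          (fun st (p : Int × Bool) =>
            if p.2 then (st.1 ++ [(k + st.2.2, p.1)], st.2.1, st.2.2 + 1)
            else (st.1 ++ [(st.2.1, p.1)], st.2.1 + 1, st.2.2))
          (P, a, r)).1)
      = P ++ pvG k q a r := by
  intro q
  induction q with
  | nil => intro a r P; simp [pvG]
  | cons p rest ih =>
      intro a r P
      by_cases hp : p.2
      · simp [pvG, hp, ih]
      · simp [pvG, hp, ih]

-- pvG is a permutation of the two enumerated halves
lemma pv_perm (k : Int) :
    ∀ (q : List (Int × Bool)) (a r : Int),
      (pvG k q a r).Perm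
        (PySem.List.enumerate ((q.filter (fun p => !p.2)).map (fun p => p.1)) a
          ++ PySem.List.enumerate ((q.filter (fun p => p.2)).map (fun p => p.1)) (k + r)) := by
  intro q
  induction q with
  | nil => intro a r; simp [pvG, PySem.List.enumerate_nil]
  | cons p rest ih =>
      intro a r
      by_cases hp : p.2
      · simp only [pvG, hp, if_pos, List.filter_cons]
        simp only [List.map_cons, PySem.List.enumerate_cons]
        refine List.Perm.trans ?_ List.perm_middle.symm
        refine List.Perm.cons _ ?_
        have := ih a (r + 1)
        have harith : k + (r + 1) = k + r + 1 := by ring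
        rw [harith] at this
        exact this
      · simp only [pvG, hp, List.filter_cons]
        simp only [Bool.not_false, Bool.false_eq_true, if_false, if_true,
          List.map_cons, PySem.List.enumerate_cons]
        exact List.Perm.cons _ (ih (a + 1) r)

-- insertBy only looks at comparisons of x with members of acc
lemma pv_insertBy_congr {α : Type} (f g : α → α → Bool) (x : α) :
    ∀ acc : List α, (∀ b ∈ acc, f x b = g x b) →
      PySem.List.insertBy f x acc = PySem.List.insertBy g x acc := by
  intro acc
  induction acc with
  | nil => intro _; rfl
  | cons y ys ih =>
      intro h
      simp only [PySem.List.insertBy]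
      rw [h y (by simp)]
      by_cases hg : g x y
      · simp [hg]
      · simp [hg, ih (fun b hb => h b (by simp [hb]))]

-- hence so does the insertion-sort fold, as long as f and g agree on all pairs seen
lemma pv_foldl_insertBy_congr {α : Type} (f g : α → α → Bool) :
    ∀ (l acc : List α), (∀ x ∈ l, ∀ b, (b ∈ acc ∨ b ∈ l) → f x b = g x b) →
      l.foldl (fun acc x => PySem.List.insertBy f x acc) acc
      = l.foldl (fun acc x => PySem.List.insertBy g x acc) acc := by
  intro l
  induction l with
  | nil => intro acc _; rfl
  | cons x rest ih =>
      intro acc h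
      simp only [List.foldl_cons]
      rw [pv_insertBy_congr f g x acc (fun b hb => h x (by simp) b (Or.inl hb))]
      apply ih
      intro x' hx' b hb
      rcases hb with hb | hb
      · rcases (PySem.List.mem_insertBy g x b acc).mp hb with hb | hb
        · exact h x' (by simp [hx']) b (Or.inr (by simp [hb]))
        · exact h x' (by simp [hx']) b (Or.inl hb)
      · exact h x' (by simp [hx']) b (Or.inr (by simp [hb]))

-- with pairwise-distinct first components, Python's tuple sort is the sort by first component
lemma pv_sorted2_eq_sorted_fst (s : List (Int × Int)) (h : (s.map Prod.fst).Nodup) :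
    PySem.List.sorted2 s (fun p => p.1) (fun p => p.2)
    = PySem.List.sorted s (fun p => p.1) := by
  rw [PySem.List.sorted_eq_foldl_insertBy]
  simp only [PySem.List.sorted2, if_neg (by decide : ¬ (false = true))]
  apply pv_foldl_insertBy_congr
  intro x hx b hb
  rcases hb with hb | hb
  · simp at hb
  · rcases lt_trichotomy x.1 b.1 with hlt | heq | hgt
    · have h1 : ¬ b.1 < x.1 := by omega
      simp [hlt, h1]
    · have hxb : x = b := List.inj_on_of_nodup_map h hx hb heq
      subst hxb
      simp
    · have h1 : ¬ x.1 < b.1 := by omega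
      simp [h1, hgt]

-- enumerate(is_reduce) is the index/flag table over range(n)
lemma pv_q_eq (shape_before_reduce : List Int) (reduce_axis_index : List Int) :
    PySem.List.enumerate (pvIsReduce shape_before_reduce reduce_axis_index)
    = (PySem.List.pyRange 0 (shape_before_reduce.length : Int) 1).map
        (fun j => (j, decide (j ∈ reduce_axis_index))) := by
  rw [PySem.List.enumerate_eq_map_pyRange _ false]
  have hlen : PySem.List.len (pvIsReduce shape_before_reduce reduce_axis_index)
      = (shape_before_reduce.length : Int) := by
    simp [PySem.List.len, pvIsReduce, PySem.List.length_pyRange_one]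
  rw [hlen]
  apply List.map_congr_left
  intro j hj
  rcases PySem.List.mem_pyRange_one.mp hj with ⟨h0, h1⟩
  obtain ⟨m, rfl⟩ : ∃ m : Nat, j = (m : Int) := ⟨j.toNat, (Int.toNat_of_nonneg h0).symm⟩
  have hm : m < shape_before_reduce.length := by exact_mod_cast h1
  rw [pvIsReduce, PySem.List.pyGetD_map_pyRange _ _ _ _ hm]

-- k counts the non-reduce axes
lemma pv_k_eq (shape_before_reduce : List Int) (reduce_axis_index : List Int) :
    pvK shape_before_reduce reduce_axis_index
    = ((pvNonRed shape_before_reduce reduce_axis_index).length : Int) := by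
  unfold pvK pvNonRed pvIsReduce
  rw [PySem.List.count_eq]
  congr 1
  rw [List.count_eq_countP, List.countP_map, List.countP_eq_length_filter]
  apply congrArg
  apply List.filter_congr
  intro x _
  simp

-- B's sorted rank pairs are exactly the enumeration of (non-reduce axes ++ reduce axes)
lemma pv_pairs_eq (shape_before_reduce : List Int) (reduce_axis_index : List Int) :
    pvPairs shape_before_reduce reduce_axis_index
    = PySem.List.enumerate
        (pvNonRed shape_before_reduce reduce_axis_index
          ++ pvRed shape_before_reduce reduce_axis_index) 0 := by
  set E := PySem.List.enumerate
      (pvNonRed shape_before_reduce reduce_axis_index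
        ++ pvRed shape_before_reduce reduce_axis_index) 0 with hE
  have hperm :
      ((((PySem.List.enumerate (pvIsReduce shape_before_reduce reduce_axis_index)).foldl
          (fun st (p : Int × Bool) =>
            if p.2 then (st.1 ++ [(pvK shape_before_reduce reduce_axis_index + st.2.2, p.1)], st.2.1, st.2.2 + 1)
            else (st.1 ++ [(st.2.1, p.1)], st.2.1 + 1, st.2.2))
          (([] : List (Int × Int)), (0 : Int), (0 : Int))).1)).Perm E := by
    rw [pv_fold_fst, List.nil_append]
    refine List.Perm.trans (pv_perm _ _ 0 0) ?_
    rw [pv_q_eq, List.filter_map, List.filter_map, List.map_map, List.map_map]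
    have h1 : ((PySem.List.pyRange 0 (shape_before_reduce.length : Int) 1).filter
        ((fun (p : Int × Bool) => !p.2) ∘ fun j => (j, decide (j ∈ reduce_axis_index)))).map
        ((fun (p : Int × Bool) => p.1) ∘ fun j => (j, decide (j ∈ reduce_axis_index)))
        = pvNonRed shape_before_reduce reduce_axis_index := by
      simp [pvNonRed, Function.comp_def]
    have h2 : ((PySem.List.pyRange 0 (shape_before_reduce.length : Int) 1).filter
        ((fun (p : Int × Bool) => p.2) ∘ fun j => (j, decide (j ∈ reduce_axis_index)))).map
        ((fun (p : Int × Bool) => p.1) ∘ fun j => (j, decide (j ∈ reduce_axis_index)))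
        = pvRed shape_before_reduce reduce_axis_index := by
      simp [pvRed, Function.comp_def]
    rw [h1, h2, hE, PySem.List.enumerate_append, pv_k_eq]
    simp
  have hnodup : (E.map Prod.fst).Nodup := by
    rw [hE]
    have := PySem.List.map_fst_enumerate
      (pvNonRed shape_before_reduce reduce_axis_index ++ pvRed shape_before_reduce reduce_axis_index) 0
    rw [this]
    exact PySem.List.nodup_pyRange_one _ _
  have hnodup' : (((((PySem.List.enumerate (pvIsReduce shape_before_reduce reduce_axis_index)).foldl
          (fun st (p : Int × Bool) =>
            if p.2 then (st.1 ++ [(pvK shape_before_reduce reduce_axis_index + st.2.2, p.1)], st.2.1, st.2.2 + 1)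
            else (st.1 ++ [(st.2.1, p.1)], st.2.1 + 1, st.2.2))
          (([] : List (Int × Int)), (0 : Int), (0 : Int))).1)).map Prod.fst).Nodup :=
    ((hperm.map Prod.fst).nodup_iff).mpr hnodup
  unfold pvPairs
  rw [pv_sorted2_eq_sorted_fst _ hnodup']
  exact PySem.List.sorted_eq_of_perm_of_pairwise_lt _ _ _ hperm.symm
    (PySem.List.pairwise_lt_enumerate _ 0)

-- ===== VERDICT (by name: the statement is the Claim_ definition above) =====
theorem reorder_reduce_last_shape_py_spec : Claim_equal_reorder_reduce_last_shape_py := by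
  intro shape R _
  unfold Spec_reorder_reduce_last_shape_py reorder_reduce_last_shape_py reorder_reduce_last_shape_py_alt
  simp only []
  rw [PySem.List.enumerate_eq_map_pyRange (d := 0),
      PySem.List.foldl_ite_eq_foldl_filter, PySem.List.foldl_ite_eq_foldl_filter,
      List.filter_map, List.filter_map, ← List.foldl_append, ← List.map_append]
  rw [pv_bridge]
  rw [pv_pairs_eq]
  rw [pv_split]
  simp only [List.nil_append]
  have hfi : (PySem.List.pyRange 0 (PySem.List.len shape) 1).filter
        ((fun (p : Int × Int) => p.1 ∉ R) ∘ fun j => (j, PySem.List.pyGetD shape j 0))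
      ++ (PySem.List.pyRange 0 (PySem.List.len shape) 1).filter
        ((fun (p : Int × Int) => p.1 ∈ R) ∘ fun j => (j, PySem.List.pyGetD shape j 0))
      = pvNonRed shape R ++ pvRed shape R := by
    simp [pvNonRed, pvRed, PySem.List.len, Function.comp_def, decide_not]
  rw [hfi]
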